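-- pv_equiv track=rewrite | github.com/bliakher/malgym_7AG | skupina_s2/kod_z_hodin/kod_z_hodin/septima_10_12.py | secti_pole3
-- ===== SOURCE A (Python) =====
-- def secti_pole3(pole1, pole2):
--   i = 0
--   pole3 = []
--
--   if len(pole1) > len(pole2):
--     delsi = pole1
--     kratsi = pole2
--     delka_kratsiho = len(pole2)
--   else:
--     delsi = pole2
--     kratsi = pole1
--     delka_kratsiho = len(pole1)
--
--   while i < delka_kratsiho:
--       pole3.append(pole1[i] + pole2[i])
--       i += 1
--
--   if len(pole1) != len(pole2):
--     prebyva = delsi[i:]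
--     pole3.extend(prebyva)
--
--   return pole3
-- ===== SOURCE B (Python) =====
-- def secti_pole3(pole1, pole2):
--   # element-wise sum under zero padding: missing entries count as 0,
--   # so the remainder of the longer list appears unchanged.
--   return [(pole1[i] if i < len(pole1) else 0) + (pole2[i] if i < len(pole2) else 0)
--           for i in range(max(len(pole1), len(pole2)))]
-- ===== Notes on version B (the rewrite author's own statement) =====
-- stated objective: alternative
-- what changed: Recasts the task as an element-wise sum under zero padding: one comprehension over range(max(len1,len2)) with missing entries taken as 0, eliminating the longer/shorter selection, the separate common-prefix loop and the remainder-append branch.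
import Mathlib
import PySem

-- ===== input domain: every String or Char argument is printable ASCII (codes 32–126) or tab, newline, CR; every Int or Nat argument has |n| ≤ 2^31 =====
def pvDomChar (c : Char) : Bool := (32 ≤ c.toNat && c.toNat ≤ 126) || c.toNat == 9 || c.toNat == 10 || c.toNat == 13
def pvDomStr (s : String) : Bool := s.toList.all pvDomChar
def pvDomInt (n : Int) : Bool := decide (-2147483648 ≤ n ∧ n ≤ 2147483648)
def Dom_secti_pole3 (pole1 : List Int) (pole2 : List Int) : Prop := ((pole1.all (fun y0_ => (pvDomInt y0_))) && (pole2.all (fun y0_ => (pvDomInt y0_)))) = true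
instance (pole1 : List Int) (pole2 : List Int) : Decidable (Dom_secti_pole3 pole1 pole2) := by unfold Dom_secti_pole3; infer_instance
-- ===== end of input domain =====

-- B recasts A's prefix-loop-plus-remainder as one element-wise sum under zero padding (same values, different decomposition; return-value equivalence — A mutates only its local list).

-- ===== PORT A =====
-- while-loop of A: append pole1[i]+pole2[i] while i < delka_kratsiho (indices always in range, getD is exact here)
def sectiLoopA (pole1 pole2 : List Int) (k i : Nat) (acc : List Int) : List Int :=
  if i < k then
    sectiLoopA pole1 pole2 k (i + 1) (acc ++ [pole1.getD i 0 + pole2.getD i 0])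
  else acc
termination_by k - i

def secti_pole3 (pole1 : List Int) (pole2 : List Int) : List Int :=
  let (delsi, _kratsi, delka_kratsiho) :=
    if pole1.length > pole2.length then (pole1, pole2, pole2.length)
    else (pole2, pole1, pole1.length)
  let pole3 := sectiLoopA pole1 pole2 delka_kratsiho 0 []
  if pole1.length ≠ pole2.length then
    pole3 ++ PySem.List.slice delsi (some (delka_kratsiho : Int)) none
  else pole3

-- ===== PORT B =====
def secti_pole3_alt (pole1 : List Int) (pole2 : List Int) : List Int :=
  (List.range (max pole1.length pole2.length)).map
    (fun i => (if i < pole1.length then pole1.getD i 0 else 0)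
            + (if i < pole2.length then pole2.getD i 0 else 0))

-- ===== PRECONDITION & SPEC =====
def Spec_secti_pole3 (pole1 : List Int) (pole2 : List Int) (out : List Int) : Prop := out = secti_pole3_alt pole1 pole2
instance (pole1 : List Int) (pole2 : List Int) (out : List Int) : Decidable (Spec_secti_pole3 pole1 pole2 out) := by unfold Spec_secti_pole3; infer_instance

-- ===== CLAIM (what is proved, stated in full; the proofs are below) =====
def Claim_equal_secti_pole3 : Prop := ∀ (pole1 : List Int) (pole2 : List Int), Dom_secti_pole3 pole1 pole2 → Spec_secti_pole3 pole1 pole2 (secti_pole3 pole1 pole2)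

-- ===== LEMMAS AND PROOFS =====

-- A's while-loop computes the zipWith of the common prefix.
theorem sectiLoopA_eq (pole1 pole2 : List Int) (k : Nat)
    (hk : k = min pole1.length pole2.length) :
    ∀ i acc, sectiLoopA pole1 pole2 k i acc
      = acc ++ List.zipWith (· + ·) (pole1.drop i) (pole2.drop i) := by
  subst hk
  intro i
  induction h : min pole1.length pole2.length - i generalizing i with
  | zero =>
    intro acc
    rw [sectiLoopA]
    have hi : ¬ i < min pole1.length pole2.length := by omega
    have h1 : pole1.length ≤ i ∨ pole2.length ≤ i := by omega
    rcases h1 with h1 | h1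
    · simp [hi, List.drop_eq_nil_of_le h1]
    · simp [hi, List.drop_eq_nil_of_le h1]
  | succ n ih =>
    intro acc
    have hi : i < min pole1.length pole2.length := by omega
    have h1 : i < pole1.length := by omega
    have h2 : i < pole2.length := by omega
    rw [sectiLoopA]
    simp only [hi, if_pos]
    rw [ih (i + 1) (by omega), List.append_assoc, List.singleton_append]
    rw [List.drop_eq_getElem_cons h1, List.drop_eq_getElem_cons h2, List.zipWith_cons_cons]
    simp [List.getD_eq_getElem?_getD, h1, h2]

-- B's zero-padded sum equals zipWith of the common prefix followed by both tails.
theorem secti_pole3_alt_eq (pole1 pole2 : List Int) :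
    secti_pole3_alt pole1 pole2
      = List.zipWith (· + ·) pole1 pole2
          ++ pole1.drop (min pole1.length pole2.length)
          ++ pole2.drop (min pole1.length pole2.length) := by
  apply List.ext_getElem
  · simp [secti_pole3_alt]; omega
  · intro i hL hR
    have hi : i < max pole1.length pole2.length := by
      simpa [secti_pole3_alt] using hL
    simp only [secti_pole3_alt, List.getElem_map, List.getElem_range]
    by_cases hmin : i < min pole1.length pole2.length
    · have h1 : i < pole1.length := by omega
      have h2 : i < pole2.length := by omega
      rw [List.getElem_append_left (by simp; omega),
          List.getElem_append_left (by simp; omega)]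
      simp [List.getElem_zipWith, h1, h2, List.getD_eq_getElem?_getD]
    · by_cases h1 : i < pole1.length
      · have h2 : ¬ i < pole2.length := by omega
        rw [List.getElem_append_left (by simp; omega),
            List.getElem_append_right (by simp; omega)]
        simp [h1, h2, List.getD_eq_getElem?_getD]
        congr 1
        omega
      · have h2 : i < pole2.length := by omega
        rw [List.getElem_append_right (by simp; omega)]
        simp [h1, h2, List.getD_eq_getElem?_getD]
        congr 1
        omega

-- ===== VERDICT (by name: the statement is the Claim_ definition above) =====
theorem secti_pole3_spec : Claim_equal_secti_pole3 := by
  intro pole1 pole2 _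
  unfold Spec_secti_pole3 secti_pole3
  rw [secti_pole3_alt_eq]
  by_cases hgt : pole1.length > pole2.length
  · have hmin : min pole1.length pole2.length = pole2.length := by omega
    have hne : pole1.length ≠ pole2.length := by omega
    simp only [hgt, if_pos, hne, ne_eq, not_false_eq_true]
    rw [sectiLoopA_eq pole1 pole2 pole2.length hmin.symm 0 []]
    rw [PySem.List.slice_from_natCast]
    simp [hmin, List.drop_eq_nil_of_le]
  · have hmin : min pole1.length pole2.length = pole1.length := by omega
    simp only [gt_iff_lt, hgt, if_false]
    by_cases heq : pole1.length = pole2.length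
    · simp only [heq, ne_eq, not_true_eq_false, if_false]
      rw [sectiLoopA_eq pole1 pole2 pole2.length (by omega) 0 []]
      simp [heq, List.drop_eq_nil_of_le]
    · simp only [ne_eq, heq, not_false_eq_true, if_true]
      rw [sectiLoopA_eq pole1 pole2 pole1.length hmin.symm 0 []]
      rw [PySem.List.slice_from_natCast]
      simp [hmin, List.drop_eq_nil_of_le]
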